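-- pv_equiv track=rewrite | github.com/alotbsol/IH21_VotingSystemSimulation | v_methods.py | min_utility
-- ===== SOURCE A (Python) =====
-- def min_utility(input_utility):
--     finding_min = []
--     for i in input_utility:
--         finding_min.append(sum(input_utility[i]))
--
--     min_utility_value = min(finding_min)
--     loser = [iii for iii, j in enumerate(finding_min) if j == min_utility_value]
--     loser = [x + 1 for x in loser]
--
--     return loser
-- ===== SOURCE B (Python) =====
-- def min_utility(input_utility):
--     loser = []
--     best = None
--     for idx, values in enumerate(input_utility.values(), start=1):
--         s = sum(values)
--         if best is None or s < best:
--             best = s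
--             loser = [idx]
--         elif s == best:
--             loser.append(idx)
--     return loser
-- ===== Notes on version B (the rewrite author's own statement) =====
-- stated objective: simpler
-- what changed: A builds a list of per-key sums via dict lookups, then calls min, then filters enumerate in two more comprehensions; B is one streaming pass over .values() keeping a running minimum and the current tie list, with no lookups and no intermediate lists.
-- outside the precondition, e.g. on min_utility({}): A raises ValueError, B returns []
import Mathlib
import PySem

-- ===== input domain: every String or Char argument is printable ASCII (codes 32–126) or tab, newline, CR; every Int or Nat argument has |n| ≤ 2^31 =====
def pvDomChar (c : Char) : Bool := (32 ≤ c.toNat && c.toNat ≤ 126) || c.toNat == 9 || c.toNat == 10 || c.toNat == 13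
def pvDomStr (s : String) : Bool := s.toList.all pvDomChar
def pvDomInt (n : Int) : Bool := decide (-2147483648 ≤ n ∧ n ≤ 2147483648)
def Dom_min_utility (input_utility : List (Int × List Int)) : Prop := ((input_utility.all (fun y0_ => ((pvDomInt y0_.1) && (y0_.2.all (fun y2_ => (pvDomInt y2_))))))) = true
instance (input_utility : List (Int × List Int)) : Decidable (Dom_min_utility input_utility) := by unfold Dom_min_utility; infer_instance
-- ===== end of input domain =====

-- B replaces A's three passes (build sums via dict lookups, min, enumerate-filter) by one
-- streaming pass over the values with a running minimum and tie list; return values proved equal.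


-- ===== PORT A =====
def min_utility (input_utility : List (Int × List Int)) : List Int :=
  let d := PySem.Dict.mk input_utility
  -- for i in input_utility: finding_min.append(sum(input_utility[i]))
  let finding_min := d.keys.foldl (fun acc i => acc ++ [((d.get? i).getD []).sum]) []
  match PySem.List.min? finding_min (fun x => x) with   -- min(finding_min); ValueError on []
  | none => []
  | some m =>
    let loser := (PySem.List.enumerate finding_min 0).foldl
      (fun acc p => if p.2 = m then acc ++ [p.1] else acc) []
    loser.map (fun x => x + 1)

-- ===== PORT B =====
def altLoop : List (List Int) → Int → Option Int → List Int → List Int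
  | [], _, _, loser => loser
  | v :: rest, idx, best, loser =>
    let s := v.sum
    match best with
    | none => altLoop rest (idx + 1) (some s) [idx]
    | some b =>
      if s < b then altLoop rest (idx + 1) (some s) [idx]
      else if s = b then altLoop rest (idx + 1) (some b) (loser ++ [idx])
      else altLoop rest (idx + 1) (some b) loser

def min_utility_alt (input_utility : List (Int × List Int)) : List Int :=
  altLoop (PySem.Dict.mk input_utility).values 1 none []

-- ===== PRECONDITION & SPEC =====
-- Pre_ excludes the empty dict (A's min([]) raises ValueError) and association lists with
-- duplicate keys, which do not represent any Python dict (the parameter is dict[int, list[int]]).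
def Pre_min_utility (input_utility : List (Int × List Int)) : Prop :=
  input_utility ≠ [] ∧ (input_utility.map Prod.fst).Nodup
instance (input_utility : List (Int × List Int)) : Decidable (Pre_min_utility input_utility) := by unfold Pre_min_utility; infer_instance
def pvWitness_min_utility : (List (Int × List Int)) := [(0, [1, 2]), (3, [3]), (7, [])]

def Spec_min_utility (input_utility : List (Int × List Int)) (out : List Int) : Prop := out = min_utility_alt input_utility
instance (input_utility : List (Int × List Int)) (out : List Int) : Decidable (Spec_min_utility input_utility out) := by unfold Spec_min_utility; infer_instance

-- ===== CLAIM (what is proved, stated in full; the proofs are below) =====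
def Claim_equal_min_utility : Prop := ∀ (input_utility : List (Int × List Int)), Dom_min_utility input_utility → Pre_min_utility input_utility → Spec_min_utility input_utility (min_utility input_utility)

-- ===== LEMMAS AND PROOFS =====

/-- The indices (shifted by +1, Python-style, starting at `idx`) of the entries of `sums`
equal to `m`: the common normal form of both programs' outputs. -/
def gIdx : List Int → Int → Int → List Int
  | [], _, _ => []
  | s :: t, idx, m => (if s = m then [idx] else []) ++ gIdx t (idx + 1) m

/-- Same, with the raw (unshifted) enumerate indices. -/
def gIdx0 : List Int → Int → Int → List Int
  | [], _, _ => []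
  | s :: t, j, m => (if s = m then [j] else []) ++ gIdx0 t (j + 1) m

theorem foldl_min_le_init (t : List Int) : ∀ b : Int, t.foldl min b ≤ b := by
  induction t with
  | nil => intro b; simp
  | cons s t ih =>
      intro b
      calc (s :: t).foldl min b = t.foldl min (min b s) := by simp [List.foldl]
        _ ≤ min b s := ih _
        _ ≤ b := min_le_left _ _

theorem altLoop_some (vs : List (List Int)) : ∀ (idx b : Int) (L : List Int),
    altLoop vs idx (some b) L =
      (if (vs.map List.sum).foldl min b = b then L else []) ++
        gIdx (vs.map List.sum) idx ((vs.map List.sum).foldl min b) := by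
  induction vs with
  | nil => intro idx b L; simp [altLoop, gIdx]
  | cons v rest ih =>
      intro idx b L
      have hle : ∀ c : Int, (rest.map List.sum).foldl min c ≤ c := foldl_min_le_init _
      by_cases h1 : v.sum < b
      · have hmin : min b v.sum = v.sum := by omega
        have hne : (rest.map List.sum).foldl min v.sum ≠ b := by
          have := hle v.sum; omega
        have hne2 : ¬ (b = (rest.map List.sum).foldl min v.sum) := fun h => hne h.symm
        simp only [altLoop, List.map_cons, List.foldl_cons, hmin, if_pos h1, ih, gIdx]
        by_cases h2 : (rest.map List.sum).foldl min v.sum = v.sum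
        · rw [h2]
          have hb : ¬ (v.sum = b) := by omega
          simp [hb]
        · have : ¬ (v.sum = (rest.map List.sum).foldl min v.sum) := fun h => h2 h.symm
          simp [h2, hne, this]
      · by_cases h2 : v.sum = b
        · have hmin : min b v.sum = b := by omega
          simp only [altLoop, List.map_cons, List.foldl_cons, hmin, if_neg h1, if_pos h2, ih, gIdx]
          by_cases h3 : (rest.map List.sum).foldl min b = b
          · rw [h3]
            simp [h2]
          · have : ¬ (b = (rest.map List.sum).foldl min b) := fun h => h3 h.symm
            simp [h3, h2, this]
        · have hmin : min b v.sum = b := by omega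
          have hne : ¬ (v.sum = (rest.map List.sum).foldl min b) := by
            have := hle b; omega
          simp only [altLoop, List.map_cons, List.foldl_cons, hmin, if_neg h1, if_neg h2, ih, gIdx]
          simp [hne]

theorem foldl_enum_eq_gIdx0 (t : List Int) : ∀ (j m : Int) (acc : List Int),
    List.foldl (fun acc p => if p.2 = m then acc ++ [p.1] else acc) acc
        (PySem.List.enumerate t j) = acc ++ gIdx0 t j m := by
  induction t with
  | nil => intro j m acc; simp [PySem.List.enumerate_nil, gIdx0]
  | cons s t ih =>
      intro j m acc
      rw [PySem.List.enumerate_cons]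
      simp only [List.foldl_cons, gIdx0]
      by_cases h : s = m
      · simp only [if_pos h, ih]
        simp
      · simp only [if_neg h, ih]
        simp

theorem map_add_one_gIdx0 (t : List Int) : ∀ (j m : Int),
    (gIdx0 t j m).map (fun x => x + 1) = gIdx t (j + 1) m := by
  induction t with
  | nil => intro j m; simp [gIdx0, gIdx]
  | cons s t ih =>
      intro j m
      simp only [gIdx0, gIdx, List.map_append, ih]
      by_cases h : s = m <;> simp [h]

theorem sums_eq (l : List (Int × List Int)) (hnd : (l.map Prod.fst).Nodup) :
    l.map (fun x => (((PySem.Dict.mk l).get? x.1).getD []).sum) = l.map (fun x => x.2.sum) := by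
  induction l with
  | nil => simp
  | cons p rest ih =>
      obtain ⟨k, v⟩ := p
      simp only [List.map_cons, List.nodup_cons] at hnd
      simp only [List.map_cons]
      congr 1
      · simp [PySem.Dict.get?_mk_cons]
      · have hcongr : rest.map (fun x => (((PySem.Dict.mk ((k, v) :: rest)).get? x.1).getD []).sum)
            = rest.map (fun x => (((PySem.Dict.mk rest).get? x.1).getD []).sum) := by
          apply List.map_congr_left
          intro x hx
          have hne : ¬ ((k == x.1) = true) := by
            intro h
            exact hnd.1 ((eq_of_beq h) ▸ (List.mem_map_of_mem hx : x.1 ∈ rest.map Prod.fst))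
          simp [PySem.Dict.get?_mk_cons, hne]
        rw [hcongr, ih hnd.2]

-- ===== VERDICT (by name: the statement is the Claim_ definition above) =====
theorem min_utility_spec : Claim_equal_min_utility := by
  intro l _hdom hpre
  obtain ⟨hne, hnd⟩ := hpre
  unfold Spec_min_utility min_utility min_utility_alt
  simp only [PySem.Dict.keys_mk, PySem.Dict.values_mk,
    PySem.List.foldl_append_singleton_eq_map, List.nil_append, List.map_map, Function.comp_def]
  rw [show (l.map fun x => (((PySem.Dict.mk l).get? x.1).getD []).sum)
        = l.map (fun x => x.2.sum) from sums_eq l hnd]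
  obtain ⟨p, rest, rfl⟩ : ∃ p rest, l = p :: rest := by
    cases l with
    | nil => exact absurd rfl hne
    | cons p rest => exact ⟨p, rest, rfl⟩
  simp only [List.map_cons, PySem.List.min?_id_cons, altLoop]
  rw [altLoop_some, foldl_enum_eq_gIdx0, List.nil_append, map_add_one_gIdx0]
  simp only [List.map_map, Function.comp_def, gIdx]
  norm_num
  by_cases h : List.foldl min p.2.sum (List.map (fun x => x.2.sum) rest) = p.2.sum
  · simp [h]
  · have h2 : ¬ (p.2.sum = List.foldl min p.2.sum (List.map (fun x => x.2.sum) rest)) :=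
      fun hx => h hx.symm
    simp [h, h2]
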